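-- pv_equiv track=rewrite | github.com/cockroachdb/docs | src/current/check_sidebar.py | is_excluded
-- ===== SOURCE A (Python) =====
-- EXCLUDED_FILES_AND_DIRS = [
--     "index.html", "index.md", "search.html", "404.md",
--     "src/current/v23.1/", "v23.1/", "node_modules/",
--     "__tests__", "build", "scripts", "vendor/", "_includes/",
--     "_site/", "jekyll-algolia-dev/", "jekyll-algolia-dev", "archived",
--     "package.json", "package-lock.json",
--     "v1.0/", "v1.1/", "v2.0/", "v2.1/",
--     "v19.1/", "v19.2/", "v20.1/", "v20.2/",
--     "v21.1/", "v22.1/", "v24.2/", "v23.2/",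
--     "v21.2/", "v22.2/", "v24.1/", "ci"
-- ]
--
-- def is_excluded(path):
--     """
--     Check if a given path should be excluded based on the exclusion list.
--     """
--     for excluded in EXCLUDED_FILES_AND_DIRS:
--         if excluded.endswith('/'):  # Check for directories
--             if path.startswith(excluded):
--                 return True
--         else:  # Check for files
--             if path == excluded:
--                 return True
--     return False
-- ===== SOURCE B (Python) =====
-- EXCLUDED_FILES_AND_DIRS = [
--     "index.html", "index.md", "search.html", "404.md",
--     "src/current/v23.1/", "v23.1/", "node_modules/",
--     "__tests__", "build", "scripts", "vendor/", "_includes/",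
--     "_site/", "jekyll-algolia-dev/", "jekyll-algolia-dev", "archived",
--     "package.json", "package-lock.json",
--     "v1.0/", "v1.1/", "v2.0/", "v2.1/",
--     "v19.1/", "v19.2/", "v20.1/", "v20.2/",
--     "v21.1/", "v22.1/", "v24.2/", "v23.2/",
--     "v21.2/", "v22.2/", "v24.1/", "ci"
-- ]
--
-- # Length-bucketed lookup table: exact file names in one set, and the directory
-- # prefixes grouped by their length, so a prefix test is a slice of the path
-- # followed by a set lookup (no scan over entries, no startswith at all).
-- _EXACT = frozenset(e for e in EXCLUDED_FILES_AND_DIRS if not e.endswith('/'))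
-- _PREFIXES_BY_LEN = {}
-- for _e in EXCLUDED_FILES_AND_DIRS:
--     if _e.endswith('/'):
--         _PREFIXES_BY_LEN.setdefault(len(_e), set()).add(_e)
--
-- def is_excluded(path):
--     """
--     Check if a given path should be excluded based on the exclusion list.
--     """
--     if path in _EXACT:
--         return True
--     for length, prefixes in _PREFIXES_BY_LEN.items():
--         if path[:length] in prefixes:
--             return True
--     return False
-- ===== Notes on version B (the rewrite author's own statement) =====
-- stated objective: alternative
-- what changed: Replaces A's per-call scan over all 33 entries (with an endswith branch and a startswith/equality test per entry) by a precomputed length-bucketed table: a frozenset of exact names plus a dict mapping each distinct prefix length to the set of prefixes of that length, so the body does one set membership test and, per distinct length (7 of them), one path slice and one set lookup - startswith is not used at all.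
import Mathlib
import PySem

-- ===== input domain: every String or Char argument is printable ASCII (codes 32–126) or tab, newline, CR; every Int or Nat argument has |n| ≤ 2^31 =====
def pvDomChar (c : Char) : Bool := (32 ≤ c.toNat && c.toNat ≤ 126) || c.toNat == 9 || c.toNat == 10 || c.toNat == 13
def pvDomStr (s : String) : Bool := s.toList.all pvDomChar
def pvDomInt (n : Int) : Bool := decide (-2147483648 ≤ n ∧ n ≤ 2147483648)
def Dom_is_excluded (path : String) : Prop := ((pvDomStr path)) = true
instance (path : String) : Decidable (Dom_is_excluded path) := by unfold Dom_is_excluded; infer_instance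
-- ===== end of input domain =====

-- B replaces A's per-entry scan (startswith/equality per entry) by a precomputed
-- length-bucketed table: exact names in one set, directory prefixes grouped by length,
-- so each prefix test is one slice of the path plus one set lookup (alternative decomposition).

def EXCLUDED_FILES_AND_DIRS : List String := [
    "index.html", "index.md", "search.html", "404.md",
    "src/current/v23.1/", "v23.1/", "node_modules/",
    "__tests__", "build", "scripts", "vendor/", "_includes/",
    "_site/", "jekyll-algolia-dev/", "jekyll-algolia-dev", "archived",
    "package.json", "package-lock.json",
    "v1.0/", "v1.1/", "v2.0/", "v2.1/",
    "v19.1/", "v19.2/", "v20.1/", "v20.2/",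
    "v21.1/", "v22.1/", "v24.2/", "v23.2/",
    "v21.2/", "v22.2/", "v24.1/", "ci"]

-- ===== PORT A =====
-- A's for-loop with early return, entry by entry, branch order as in the Python
def isExcludedLoop (path : String) : List String → Bool
  | [] => false
  | e :: rest =>
      if PySem.Str.endswith e "/" then
        if PySem.Str.startswith path e then true else isExcludedLoop path rest
      else
        if path == e then true else isExcludedLoop path rest

def is_excluded (path : String) : Bool := isExcludedLoop path EXCLUDED_FILES_AND_DIRS

-- ===== PORT B =====
-- _EXACT = frozenset(e for e in EXCLUDED_FILES_AND_DIRS if not e.endswith('/'))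
def exactSet : PySem.Set String :=
  PySem.Set.ofList (EXCLUDED_FILES_AND_DIRS.filter (fun e => !PySem.Str.endswith e "/"))

-- _PREFIXES_BY_LEN = {}; for _e in …: if _e.endswith('/'): _PREFIXES_BY_LEN.setdefault(len(_e), set()).add(_e)
def prefixesByLen : PySem.Dict Int (PySem.Set String) :=
  EXCLUDED_FILES_AND_DIRS.foldl (fun d e =>
    if PySem.Str.endswith e "/" then
      d.insert (PySem.Str.len e) (PySem.Set.add (d.getD (PySem.Str.len e) PySem.Set.empty) e)
    else d) PySem.Dict.empty

-- if path in _EXACT: return True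
-- for length, prefixes in _PREFIXES_BY_LEN.items():
--     if path[:length] in prefixes: return True
-- return False
def is_excluded_alt (path : String) : Bool :=
  if PySem.Set.contains exactSet path then true
  else prefixesByLen.items.any (fun ls => PySem.Set.contains ls.2 (PySem.Str.slice path none (some ls.1)))

-- ===== PRECONDITION & SPEC =====
def Spec_is_excluded (path : String) (out : Bool) : Prop := out = is_excluded_alt path
instance (path : String) (out : Bool) : Decidable (Spec_is_excluded path out) := by unfold Spec_is_excluded; infer_instance

-- ===== CLAIM =====
def Claim_equal_is_excluded : Prop := ∀ (path : String), Dom_is_excluded path → Spec_is_excluded path (is_excluded path)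

-- ===== LEMMAS AND PROOFS =====

lemma if_true_else (c x : Bool) : (if c = true then true else x) = (c || x) := by
  cases c <;> simp

-- startswith p ↔ the length-|p| slice of the path equals p (how B's table tests a prefix)
lemma startswith_eq_slice (path p : String) (n : Int) (h : (p.toList.length : Int) = n) :
    PySem.Str.startswith path p = (PySem.Str.slice path none (some n) == p) := by
  subst h
  rw [Bool.eq_iff_iff, beq_iff_eq, PySem.Str.startswith_eq, PySem.Chars.startswith_iff,
    ← String.toList_inj, PySem.Str.toList_slice, PySem.Chars.slice_eq_listSlice,
    PySem.List.slice_to_natCast, List.prefix_iff_eq_take]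
  exact ⟨fun h => h.symm, fun h => h.symm⟩

-- A's first-match loop over any list equals: exact match among the non-'/' entries
-- OR prefix match among the '/' entries.
lemma loop_split (path : String) (l : List String) :
    isExcludedLoop path l =
      ((l.filter (fun e => !PySem.Str.endswith e "/")).any (fun e => path == e)
        || (l.filter (fun e => PySem.Str.endswith e "/")).any
              (fun p => PySem.Str.startswith path p)) := by
  induction l with
  | nil => rfl
  | cons e rest ih =>
      cases h : PySem.Chars.endswith e.toList ['/'] <;>
        simp [isExcludedLoop, h, ih, Bool.or_assoc, Bool.or_left_comm, beq_eq_decide]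

lemma contains_ofList_eq_any (path : String) (l : List String) :
    PySem.Set.contains (PySem.Set.ofList l) path = l.any (fun e => path == e) := by
  simp only [PySem.Set.contains]
  induction l with
  | nil => rfl
  | cons x xs ih =>
      simp only [List.any_cons, ← ih]
      rw [beq_eq_decide]
      simp [List.mem_cons, Bool.decide_or]

-- ===== VERDICT =====
set_option maxHeartbeats 2000000 in
theorem is_excluded_spec : Claim_equal_is_excluded := by
  intro path _
  unfold Spec_is_excluded
  have hit : prefixesByLen.items = [((18:Int), ["src/current/v23.1/"]), (6, ["v23.1/", "_site/", "v19.1/", "v19.2/", "v20.1/", "v20.2/", "v21.1/", "v22.1/", "v24.2/", "v23.2/", "v21.2/", "v22.2/", "v24.1/"]), (13, ["node_modules/"]), (7, ["vendor/"]), (10, ["_includes/"]), (19, ["jekyll-algolia-dev/"]), (5, ["v1.0/", "v1.1/", "v2.0/", "v2.1/"])] := by rfl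
  have hd : EXCLUDED_FILES_AND_DIRS.filter (fun e => PySem.Str.endswith e "/") = ["src/current/v23.1/", "v23.1/", "node_modules/", "vendor/", "_includes/", "_site/", "jekyll-algolia-dev/", "v1.0/", "v1.1/", "v2.0/", "v2.1/", "v19.1/", "v19.2/", "v20.1/", "v20.2/", "v21.1/", "v22.1/", "v24.2/", "v23.2/", "v21.2/", "v22.2/", "v24.1/"] := by rfl
  rw [is_excluded, loop_split, is_excluded_alt, hit, exactSet, contains_ofList_eq_any,
    if_true_else, hd]
  simp only [List.any_cons, List.any_nil]
  rw [startswith_eq_slice path "src/current/v23.1/" 18 rfl, startswith_eq_slice path "v23.1/" 6 rfl, startswith_eq_slice path "node_modules/" 13 rfl, startswith_eq_slice path "vendor/" 7 rfl, startswith_eq_slice path "_includes/" 10 rfl, startswith_eq_slice path "_site/" 6 rfl, startswith_eq_slice path "jekyll-algolia-dev/" 19 rfl, startswith_eq_slice path "v1.0/" 5 rfl, startswith_eq_slice path "v1.1/" 5 rfl, startswith_eq_slice path "v2.0/" 5 rfl, startswith_eq_slice path "v2.1/" 5 rfl, startswith_eq_slice path "v19.1/" 6 rfl, startswith_eq_slice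 path "v19.2/" 6 rfl, startswith_eq_slice path "v20.1/" 6 rfl, startswith_eq_slice path "v20.2/" 6 rfl, startswith_eq_slice path "v21.1/" 6 rfl, startswith_eq_slice path "v22.1/" 6 rfl, startswith_eq_slice path "v24.2/" 6 rfl, startswith_eq_slice path "v23.2/" 6 rfl, startswith_eq_slice path "v21.2/" 6 rfl, startswith_eq_slice path "v22.2/" 6 rfl, startswith_eq_slice path "v24.1/" 6 rfl]
  simp only [PySem.Set.contains, List.contains_eq_mem, List.mem_cons, List.not_mem_nil,
    or_false, Bool.decide_or, beq_eq_decide]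
  ac_rfl
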